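-- pv_equiv track=rewrite | github.com/ray-project/ray | rllib/core/learner/learner_group.py | _compute_num_total_mini_batches
-- ===== SOURCE A (Python) =====
-- def _compute_num_total_mini_batches(batch_size, mini_batch_size, num_iters):
--     num_total_mini_batches = 0
--     rest_size = 0
--     for i in range(num_iters):
--         eaten_batch = -rest_size
--         while eaten_batch < batch_size:
--             eaten_batch += mini_batch_size
--             num_total_mini_batches += 1
--         rest_size = mini_batch_size - (eaten_batch - batch_size)
--         if rest_size:
--             num_total_mini_batches -= 1
--     if rest_size:
--         num_total_mini_batches += 1
--     return num_total_mini_batches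
-- ===== SOURCE B (Python) =====
-- def _compute_num_total_mini_batches(batch_size, mini_batch_size, num_iters):
--     if num_iters <= 0:
--         return 0
--     total = batch_size * num_iters
--     return -(-total // mini_batch_size)
-- ===== Notes on version B (the rewrite author's own statement) =====
-- stated objective: faster
-- what changed: Replaces the nested per-iteration while-loop simulation (count one mini-batch per step, with rest-size carryover) by a single ceil-division: the total is exactly ceil(batch_size*num_iters / mini_batch_size).
-- outside the precondition, e.g. on _compute_num_total_mini_batches(-3, 1, 3): A returns -2, B returns -9; on _compute_num_total_mini_batches(0, 0, 1): A returns 0, B raises ZeroDivisionError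
import Mathlib
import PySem

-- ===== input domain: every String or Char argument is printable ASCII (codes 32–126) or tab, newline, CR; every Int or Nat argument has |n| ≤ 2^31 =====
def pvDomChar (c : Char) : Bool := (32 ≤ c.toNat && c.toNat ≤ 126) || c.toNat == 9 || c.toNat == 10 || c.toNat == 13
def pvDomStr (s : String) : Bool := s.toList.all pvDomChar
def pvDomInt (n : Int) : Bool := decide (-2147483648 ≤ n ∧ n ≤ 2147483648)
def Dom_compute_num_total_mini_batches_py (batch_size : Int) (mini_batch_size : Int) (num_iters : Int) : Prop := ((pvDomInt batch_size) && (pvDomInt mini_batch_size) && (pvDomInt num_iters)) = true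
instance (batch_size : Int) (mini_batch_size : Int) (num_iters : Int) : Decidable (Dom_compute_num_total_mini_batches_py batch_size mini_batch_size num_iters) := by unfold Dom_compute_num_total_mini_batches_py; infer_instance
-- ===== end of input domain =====

-- B replaces the nested while-loop simulation by one ceil-division, ceil(batch_size*num_iters/mini_batch_size): O(1) instead of O(num_iters*batch_size/mini_batch_size).

-- ===== PORT A =====
-- inner `while eaten_batch < batch_size:` loop; the Nat fuel is only a totality
-- guard (callers pass fuel ≥ number of iterations wherever Python terminates)
def pvEat_compute (batch_size mini_batch_size : Int) : Nat → Int → Int → Int × Int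
  | 0, eaten, cnt => (eaten, cnt)
  | fuel + 1, eaten, cnt =>
    if eaten < batch_size then
      pvEat_compute batch_size mini_batch_size fuel (eaten + mini_batch_size) (cnt + 1)
    else (eaten, cnt)

-- one iteration of the `for i in range(num_iters)` body; state = (num_total_mini_batches, rest_size)
def pvStep_compute (batch_size mini_batch_size : Int) (s : Int × Int) (_ : Nat) : Int × Int :=
  let res := pvEat_compute batch_size mini_batch_size ((batch_size + s.2).toNat + 1) (-s.2) s.1
  let rest := mini_batch_size - (res.1 - batch_size)
  (if rest ≠ 0 then res.2 - 1 else res.2, rest)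

def compute_num_total_mini_batches_py (batch_size : Int) (mini_batch_size : Int) (num_iters : Int) : Int :=
  let s := (List.range num_iters.toNat).foldl (pvStep_compute batch_size mini_batch_size) (0, 0)
  if s.2 ≠ 0 then s.1 + 1 else s.1

-- ===== PORT B =====
def compute_num_total_mini_batches_py_alt (batch_size : Int) (mini_batch_size : Int) (num_iters : Int) : Int :=
  if num_iters ≤ 0 then 0
  else
    let total := batch_size * num_iters;
    -(PySem.Int.floordiv (-total) mini_batch_size)

-- ===== PRECONDITION & SPEC =====
-- Pre_ restricts to the function's natural domain (positive batch and mini-batch sizes,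
-- or no iterations at all): outside it A either loops forever (mini_batch_size ≤ 0 with
-- work left to do) or returns accidental negative "counts" for nonpositive batch_size,
-- and B would divide by mini_batch_size = 0.
def Pre_compute_num_total_mini_batches_py (batch_size : Int) (mini_batch_size : Int) (num_iters : Int) : Prop :=
  num_iters ≤ 0 ∨ (1 ≤ batch_size ∧ 1 ≤ mini_batch_size)
instance (batch_size : Int) (mini_batch_size : Int) (num_iters : Int) : Decidable (Pre_compute_num_total_mini_batches_py batch_size mini_batch_size num_iters) := by unfold Pre_compute_num_total_mini_batches_py; infer_instance

def pvWitness_compute_num_total_mini_batches_py : Int × Int × Int := (10, 3, 4)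

def Spec_compute_num_total_mini_batches_py (batch_size : Int) (mini_batch_size : Int) (num_iters : Int) (out : Int) : Prop := out = compute_num_total_mini_batches_py_alt batch_size mini_batch_size num_iters
instance (batch_size : Int) (mini_batch_size : Int) (num_iters : Int) (out : Int) : Decidable (Spec_compute_num_total_mini_batches_py batch_size mini_batch_size num_iters out) := by unfold Spec_compute_num_total_mini_batches_py; infer_instance

-- ===== CLAIM (what is proved, stated in full; the proofs are below) =====
def Claim_equal_compute_num_total_mini_batches_py : Prop := ∀ (batch_size : Int) (mini_batch_size : Int) (num_iters : Int), Dom_compute_num_total_mini_batches_py batch_size mini_batch_size num_iters → Pre_compute_num_total_mini_batches_py batch_size mini_batch_size num_iters → Spec_compute_num_total_mini_batches_py batch_size mini_batch_size num_iters (compute_num_total_mini_batches_py batch_size mini_batch_size num_iters)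

-- ===== LEMMAS AND PROOFS =====

-- the while loop, given enough fuel, stops at the first eaten ≥ batch_size,
-- incrementing the counter once per step of size mini_batch_size
theorem pvEat_spec (b m : Int) (hm : 1 ≤ m) : ∀ (fuel : Nat) (e c : Int),
    (e < b → b - e ≤ (fuel : Int)) →
    b ≤ (pvEat_compute b m fuel e c).1 ∧
    ((pvEat_compute b m fuel e c).1 = e ∨ (pvEat_compute b m fuel e c).1 - m < b) ∧
    (pvEat_compute b m fuel e c).1 - e = m * ((pvEat_compute b m fuel e c).2 - c) := by
  intro fuel
  induction fuel with
  | zero =>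
    intro e c h
    simp only [pvEat_compute]
    constructor
    · by_contra hlt
      have := h (by omega); omega
    · exact ⟨by simp, by ring⟩
  | succ f ih =>
    intro e c h
    simp only [pvEat_compute]
    by_cases he : e < b
    · simp only [if_pos he]
      have hfuel : e + m < b → b - (e + m) ≤ (f : Int) := by
        intro _; have := h he; push_cast at this ⊢; omega
      obtain ⟨h1, h2, h3⟩ := ih (e + m) (c + 1) hfuel
      refine ⟨h1, ?_, ?_⟩
      · rcases h2 with h2 | h2
        · right; omega
        · right; exact h2
      · linear_combination h3
    · simp only [if_neg he]
      exact ⟨by omega, by simp, by ring⟩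

-- invariant of the outer for-loop: after i iterations, i*b = m*count + rest,
-- with rest = 0 initially and 1 ≤ rest ≤ m afterwards
theorem pvLoop_inv (b m : Int) (hb : 1 ≤ b) (hm : 1 ≤ m) : ∀ i : Nat,
    (i : Int) * b = m * ((List.range i).foldl (pvStep_compute b m) (0, 0)).1
        + ((List.range i).foldl (pvStep_compute b m) (0, 0)).2 ∧
    ((i = 0 ∧ ((List.range i).foldl (pvStep_compute b m) (0, 0)).2 = 0) ∨
      (1 ≤ i ∧ 1 ≤ ((List.range i).foldl (pvStep_compute b m) (0, 0)).2 ∧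
        ((List.range i).foldl (pvStep_compute b m) (0, 0)).2 ≤ m)) := by
  intro i
  induction i with
  | zero => simp
  | succ i ih =>
    rw [List.range_succ, List.foldl_append]
    obtain ⟨hsum, hr⟩ := ih
    set s := (List.range i).foldl (pvStep_compute b m) (0, 0) with hs
    have hr0 : 0 ≤ s.2 := by rcases hr with ⟨_, h⟩ | ⟨_, h, _⟩ <;> omega
    have hrm : s.2 ≤ m := by rcases hr with ⟨_, h⟩ | ⟨_, _, h⟩ <;> omega
    simp only [List.foldl_cons, List.foldl_nil, pvStep_compute]
    have hfuel : -s.2 < b → b - (-s.2) ≤ (((b + s.2).toNat + 1 : Nat) : Int) := by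
      intro _; push_cast; omega
    obtain ⟨h1, h2, h3⟩ := pvEat_spec b m hm ((b + s.2).toNat + 1) (-s.2) s.1 hfuel
    set res := pvEat_compute b m ((b + s.2).toNat + 1) (-s.2) s.1 with hres
    -- the loop body runs at least once, so res.1 ≠ -s.2
    have hran : res.1 - m < b := by
      rcases h2 with h2 | h2
      · omega
      · exact h2
    have hrest1 : 1 ≤ m - (res.1 - b) := by omega
    have hrestm : m - (res.1 - b) ≤ m := by omega
    have hne : m - (res.1 - b) ≠ 0 := by omega
    rw [if_pos hne]
    refine ⟨?_, Or.inr ⟨by omega, hrest1, hrestm⟩⟩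
    push_cast
    linear_combination hsum + h3

-- ===== VERDICT (by name: the statement is the Claim_ definition above) =====
theorem compute_num_total_mini_batches_py_spec : Claim_equal_compute_num_total_mini_batches_py := by
  intro b m n _ hpre
  unfold Spec_compute_num_total_mini_batches_py
  unfold compute_num_total_mini_batches_py compute_num_total_mini_batches_py_alt
  by_cases hn : n ≤ 0
  · have : n.toNat = 0 := by omega
    rw [this, if_pos hn]
    simp
  · rw [if_neg hn]
    obtain ⟨hb, hm⟩ : 1 ≤ b ∧ 1 ≤ m := by
      rcases hpre with h | h
      · omega
      · exact h
    obtain ⟨hsum, hr⟩ := pvLoop_inv b m hb hm n.toNat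
    set s := (List.range n.toNat).foldl (pvStep_compute b m) (0, 0) with hs
    have hnt : ((n.toNat : Int)) = n := by omega
    rw [hnt] at hsum
    have hrpos : 1 ≤ s.2 ∧ s.2 ≤ m := by
      rcases hr with ⟨h0, _⟩ | ⟨_, h1, h2⟩
      · exfalso; omega
      · exact ⟨h1, h2⟩
    have hne : s.2 ≠ 0 := by omega
    rw [if_pos hne]
    show s.1 + 1 = -PySem.Int.floordiv (-(b * n)) m
    rw [PySem.Int.floordiv_eq_ediv_of_pos (by omega : (0:Int) < m)]
    have hsplit : -(b * n) = (m - s.2) + m * (-(s.1 + 1)) := by linear_combination -hsum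
    rw [hsplit, Int.add_mul_ediv_left _ _ (by omega : m ≠ 0),
      Int.ediv_eq_zero_of_lt (by omega) (by omega)]
    ring
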